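-- pv_equiv track=rewrite | github.com/maat001kea/final-fantasy | src/trading/cdp_adapter.py | _extract_labeled_visible_value
-- ===== SOURCE A (Python) =====
-- def _extract_labeled_visible_value(text: str, label: str) -> str | None:
--     lines = [line.strip() for line in str(text or "").splitlines()]
--     target = str(label or "").strip().upper()
--     for index, line in enumerate(lines):
--         if line.strip().upper() != target:
--             continue
--         for candidate in lines[index + 1:]:
--             cleaned = candidate.strip()
--             if cleaned:
--                 return cleaned
--     return None
-- ===== SOURCE B (Python) =====
-- def _extract_labeled_visible_value(text: str, label: str) -> str | None:
--     target = str(label or "").strip().upper()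
--     armed = False
--     for raw in str(text or "").splitlines():
--         line = raw.strip()
--         if armed and line:
--             return line
--         if line.upper() == target:
--             armed = True
--     return None
-- ===== Notes on version B (the rewrite author's own statement) =====
-- stated objective: simpler
-- what changed: Replaces the nested label-scan-then-inner-scan (with a precomputed stripped-lines list) by a single streaming pass with a sticky 'armed' flag that returns the first non-empty stripped line seen after any label match.
import Mathlib
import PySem

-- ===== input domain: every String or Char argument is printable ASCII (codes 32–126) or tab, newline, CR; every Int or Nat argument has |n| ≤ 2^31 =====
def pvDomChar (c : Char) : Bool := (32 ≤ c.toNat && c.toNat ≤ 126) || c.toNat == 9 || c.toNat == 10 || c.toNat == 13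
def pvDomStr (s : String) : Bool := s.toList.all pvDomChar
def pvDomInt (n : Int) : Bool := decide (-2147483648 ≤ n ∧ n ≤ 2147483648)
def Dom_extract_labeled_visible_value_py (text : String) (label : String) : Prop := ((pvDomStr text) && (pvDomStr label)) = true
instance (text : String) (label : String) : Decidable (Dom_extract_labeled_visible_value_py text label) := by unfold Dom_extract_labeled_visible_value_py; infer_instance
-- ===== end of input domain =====

-- B replaces A's nested scan over a precomputed stripped-lines list by one streaming pass
-- with a sticky 'armed' flag (simpler; return value only, neither version mutates anything).

-- ===== PORT A =====
-- inner loop: 'for candidate in lines[index+1:]: cleaned = candidate.strip(); if cleaned: return cleaned'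
def pvFindAfterA (lines : List String) : Option String :=
  match lines with
  | [] => none
  | c :: rest =>
    let cleaned := PySem.Str.strip c
    if cleaned ≠ "" then some cleaned else pvFindAfterA rest

-- outer loop over 'enumerate(lines)'; recursing on the tail makes 'lines[index+1:]' the current rest
def pvOuterA (target : String) : List String → Option String
  | [] => none
  | line :: rest =>
    if PySem.Str.upper (PySem.Str.strip line) ≠ target then pvOuterA target rest
    else
      match pvFindAfterA rest with
      | some v => some v
      | none => pvOuterA target rest

def extract_labeled_visible_value_py (text : String) (label : String) : Option String :=
  let lines := (PySem.Str.splitlines (if text = "" then "" else text)).map PySem.Str.strip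
  let target := PySem.Str.upper (PySem.Str.strip (if label = "" then "" else label))
  pvOuterA target lines

-- ===== PORT B =====
def pvLoopB (target : String) (armed : Bool) : List String → Option String
  | [] => none
  | raw :: rest =>
    let line := PySem.Str.strip raw
    if armed && line ≠ "" then some line
    else pvLoopB target (armed || (PySem.Str.upper line == target)) rest

def extract_labeled_visible_value_py_alt (text : String) (label : String) : Option String :=
  let target := PySem.Str.upper (PySem.Str.strip (if label = "" then "" else label))
  pvLoopB target false (PySem.Str.splitlines (if text = "" then "" else text))

-- ===== PRECONDITION & SPEC =====
def Spec_extract_labeled_visible_value_py (text : String) (label : String) (out : Option String) : Prop := out = extract_labeled_visible_value_py_alt text label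
instance (text : String) (label : String) (out : Option String) : Decidable (Spec_extract_labeled_visible_value_py text label out) := by unfold Spec_extract_labeled_visible_value_py; infer_instance

-- ===== CLAIM (what is proved, stated in full; the proofs are below) =====
def Claim_equal_extract_labeled_visible_value_py : Prop := ∀ (text : String) (label : String), Dom_extract_labeled_visible_value_py text label → Spec_extract_labeled_visible_value_py text label (extract_labeled_visible_value_py text label)

-- ===== LEMMAS AND PROOFS =====

theorem pv_dropWhile_idem {α : Type} (p : α → Bool) (l : List α) :
    List.dropWhile p (List.dropWhile p l) = List.dropWhile p l := by
  cases h : List.dropWhile p l with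
  | nil => simp
  | cons x xs =>
    have hx : p x = false := by
      have := List.head_dropWhile_not p (l := l) (by simp [h])
      simpa [h] using this
    simp [hx]

theorem pv_rstrip_idem (l : List Char) :
    PySem.Chars.rstrip (PySem.Chars.rstrip l) = PySem.Chars.rstrip l := by
  simp [PySem.Chars.rstrip, pv_dropWhile_idem]

theorem pv_lstrip_rstrip_lstrip (l : List Char) :
    PySem.Chars.lstrip (PySem.Chars.rstrip (PySem.Chars.lstrip l)) =
      PySem.Chars.rstrip (PySem.Chars.lstrip l) := by
  have hpref : PySem.Chars.rstrip (PySem.Chars.lstrip l) <+: PySem.Chars.lstrip l := by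
    have := List.dropWhile_suffix (l := (PySem.Chars.lstrip l).reverse) PySem.Chars.isspace
    simpa [PySem.Chars.rstrip, List.reverse_prefix] using this.reverse
  cases hr : PySem.Chars.rstrip (PySem.Chars.lstrip l) with
  | nil => simp [PySem.Chars.lstrip]
  | cons x xs =>
    -- x is the head of lstrip l, the head of a dropWhile, hence not a space
    obtain ⟨t, ht⟩ : ∃ t, PySem.Chars.lstrip l = x :: t := by
      rcases hpref with ⟨t, h2⟩
      rw [hr] at h2
      exact ⟨xs ++ t, by simpa using h2.symm⟩
    have hne : List.dropWhile PySem.Chars.isspace l ≠ [] := by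
      simp only [PySem.Chars.lstrip] at ht
      simp [ht]
    have hx : PySem.Chars.isspace x = false := by
      have hnot := List.head_dropWhile_not PySem.Chars.isspace (l := l) hne
      have hh : (List.dropWhile PySem.Chars.isspace l).head hne = x := by
        simp only [PySem.Chars.lstrip] at ht
        simp [ht]
      rwa [hh] at hnot
    simp [PySem.Chars.lstrip, hx]

theorem pv_chars_strip_idem (l : List Char) :
    PySem.Chars.strip (PySem.Chars.strip l) = PySem.Chars.strip l := by
  simp [PySem.Chars.strip, pv_lstrip_rstrip_lstrip, pv_rstrip_idem]

theorem pv_strip_idem (s : String) :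
    PySem.Str.strip (PySem.Str.strip s) = PySem.Str.strip s := by
  apply String.ext
  simp [PySem.Str.toList_strip, pv_chars_strip_idem]

-- armed = True: B returns the first non-empty stripped line, exactly A's inner scan
theorem pv_loopB_armed (target : String) (raws : List String) :
    pvLoopB target true raws = pvFindAfterA (raws.map PySem.Str.strip) := by
  induction raws with
  | nil => simp [pvLoopB, pvFindAfterA]
  | cons raw rest ih =>
    simp only [pvLoopB, pvFindAfterA, List.map_cons, pv_strip_idem, Bool.true_and]
    by_cases h : PySem.Str.strip raw = ""
    · simp [h, ih]
    · simp [h]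

-- if nothing non-empty remains, A's outer loop can never return
theorem pv_outerA_none (target : String) (ls : List String)
    (h : pvFindAfterA ls = none) : pvOuterA target ls = none := by
  induction ls with
  | nil => simp [pvOuterA]
  | cons c rest ih =>
    have hc : ¬ PySem.Str.strip c ≠ "" := by
      intro hne; simp [pvFindAfterA, hne] at h
    have hrest : pvFindAfterA rest = none := by
      simpa [pvFindAfterA, hc] using h
    by_cases hm : PySem.Str.upper (PySem.Str.strip c) ≠ target
    · simp [pvOuterA, hm, ih hrest]
    · simp [pvOuterA, hm, hrest, ih hrest]

theorem pv_main (target : String) (raws : List String) :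
    pvOuterA target (raws.map PySem.Str.strip) = pvLoopB target false raws := by
  induction raws with
  | nil => simp [pvOuterA, pvLoopB]
  | cons raw rest ih =>
    by_cases hm : PySem.Str.upper (PySem.Str.strip raw) = target
    · simp only [List.map_cons, pvOuterA, pvLoopB, pv_strip_idem, hm]
      rw [if_neg (by simp), Bool.false_and, if_neg (by simp),
        (by simp : (false || (target == target)) = true), pv_loopB_armed]
      cases hfa : pvFindAfterA (rest.map PySem.Str.strip) with
      | some v => simp
      | none => simp [pv_outerA_none target _ hfa]
    · have harm : (false || (PySem.Str.upper (PySem.Str.strip raw) == target)) = false := by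
        simp [hm]
      simp only [List.map_cons, pvOuterA, pvLoopB, pv_strip_idem, harm, Bool.false_and]
      simp [hm, ih]

-- ===== VERDICT (by name: the statement is the Claim_ definition above) =====
theorem extract_labeled_visible_value_py_spec : Claim_equal_extract_labeled_visible_value_py := by
  intro text label _
  unfold Spec_extract_labeled_visible_value_py extract_labeled_visible_value_py
    extract_labeled_visible_value_py_alt
  exact pv_main _ _
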